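-- pv_equiv track=rewrite | github.com/jvivallos/codecrafters-shell-python | app/command_util.py | parse_multiple_commands
-- ===== SOURCE A (Python) =====
-- import shlex
--
-- def parse_multiple_commands(cmd):
--     args = shlex.split(cmd)
--     commands = []
--     current_command = []
--     for arg in args:
--         if arg == '|':
--             commands.append(" ".join(current_command))
--             current_command = []
--         else:
--             current_command.append(arg)
--     if current_command: # Add any remaining elements
--         commands.append(" ".join(current_command))
--     return commands
-- ===== SOURCE B (Python) =====
-- import re
--
-- # POSIX shell quoting: runs of whitespace, 'single quotes', "double quotes"
-- # (backslash escapes \ and "), \x escapes, or runs of plain characters.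
-- _PIECE = re.compile(r"""(\s+)|'([^']*)'|"((?:[^"\\]|\\.)*)"|\\(.)|([^\s'"\\]+)""", re.DOTALL)
-- _DQ_ESCAPE = re.compile(r'\\([\\"])')
--
-- def _tokens(s):
--     tokens = []
--     cur = None
--     i = 0
--     while i < len(s):
--         m = _PIECE.match(s, i)
--         if m is None:
--             raise ValueError('unterminated quote or dangling escape')
--         ws, sq, dq, esc, word = m.groups()
--         if ws is not None:
--             if cur is not None:
--                 tokens.append(cur)
--                 cur = None
--         else:
--             if sq is not None:
--                 piece = sq
--             elif dq is not None:
--                 piece = _DQ_ESCAPE.sub(r'\1', dq)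
--             elif esc is not None:
--                 piece = esc
--             else:
--                 piece = word
--             cur = piece if cur is None else cur + piece
--         i = m.end()
--     if cur is not None:
--         tokens.append(cur)
--     return tokens
--
-- def parse_multiple_commands(cmd):
--     args = _tokens(cmd)
--     commands = []
--     start = 0
--     while True:
--         try:
--             j = args.index('|', start)
--         except ValueError:
--             break
--         commands.append(' '.join(args[start:j]))
--         start = j + 1
--     if args[start:]:
--         commands.append(' '.join(args[start:]))
--     return commands
-- ===== Notes on version B (the rewrite author's own statement) =====
-- stated objective: faster
-- what changed: A tokenizes via shlex's pure-Python per-character loop and folds over the tokens with a current-segment accumulator flushed at each pipe token; B tokenizes with one compiled regex that consumes whole quoting pieces (whitespace runs, quoted sections, escapes, plain runs) and splits by repeatedly locating the next pipe token with list.index from a start offset and joining the slice between offsets.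
import Mathlib
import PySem

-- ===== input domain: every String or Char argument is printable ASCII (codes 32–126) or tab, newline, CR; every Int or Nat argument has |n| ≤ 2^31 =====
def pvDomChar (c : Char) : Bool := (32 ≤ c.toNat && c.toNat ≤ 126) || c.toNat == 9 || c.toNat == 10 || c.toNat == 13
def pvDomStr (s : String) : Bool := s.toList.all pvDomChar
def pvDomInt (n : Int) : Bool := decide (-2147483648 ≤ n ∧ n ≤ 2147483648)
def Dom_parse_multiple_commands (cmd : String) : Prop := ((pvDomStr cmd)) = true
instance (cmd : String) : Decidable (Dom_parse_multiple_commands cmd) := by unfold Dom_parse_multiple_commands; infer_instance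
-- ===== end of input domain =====

-- B tokenizes with one compiled regex over whole quoting pieces instead of shlex's
-- per-character loop (measurably faster, constant factor) and splits at pipe tokens by
-- repeated list.index from a start offset + slice instead of A's accumulator fold.

-- ===== PORT A =====
-- hand port of shlex.split(cmd) (posix, whitespace_split, no comments), exact on the stated
-- ASCII domain; `none` models the ValueError raised on an unclosed quote or trailing escape.
def shxWS (c : Char) : Bool := c = ' ' || c = '\t' || c = '\n' || c = '\r'

-- body of a single-quoted section: everything up to the next ', none if unterminated
def shxSingle : List Char → Option (String × List Char)
  | [] => none
  | c :: rest =>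
    if c = '\'' then some ("", rest)
    else (shxSingle rest).map (fun p => (c.toString ++ p.1, p.2))

-- body of a double-quoted section: backslash escapes only " and \, none if unterminated
def shxDouble : List Char → Option (String × List Char)
  | [] => none
  | c :: rest =>
    if c = '"' then some ("", rest)
    else if c = '\\' then
      match rest with
      | [] => none
      | d :: rest' =>
        let piece := if d = '"' ∨ d = '\\' then d.toString else "\\" ++ d.toString
        (shxDouble rest').map (fun p => (piece ++ p.1, p.2))
    else (shxDouble rest).map (fun p => (c.toString ++ p.1, p.2))

-- main tokenizer loop; fuel only makes the recursion total (each call consumes ≥ 1 char,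
-- so fuel = length + 1 is never exhausted)
def shxGo (fuel : Nat) (cs : List Char) (cur : Option String) : Option (List String) :=
  match fuel with
  | 0 => none
  | fuel + 1 =>
    match cs with
    | [] => some (match cur with | none => [] | some t => [t])
    | c :: rest =>
      if shxWS c then
        match cur with
        | none => shxGo fuel rest none
        | some t => (shxGo fuel rest none).map (t :: ·)
      else if c = '\\' then
        match rest with
        | [] => none
        | d :: rest' => shxGo fuel rest' (some (cur.getD "" ++ d.toString))
      else if c = '\'' then
        (shxSingle rest).bind (fun p => shxGo fuel p.2 (some (cur.getD "" ++ p.1)))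
      else if c = '"' then
        (shxDouble rest).bind (fun p => shxGo fuel p.2 (some (cur.getD "" ++ p.1)))
      else shxGo fuel rest (some (cur.getD "" ++ c.toString))

def shlexSplit (cmd : String) : Option (List String) :=
  shxGo (cmd.length + 1) cmd.toList none

def parse_multiple_commands (cmd : String) : List String :=
  match shlexSplit cmd with
  | none => []   -- shlex raised: excluded by Pre_
  | some args =>
    let st := args.foldl
      (fun (acc : List String × List String) arg =>
        if arg = "|" then (acc.1 ++ [PySem.Str.join " " acc.2], [])
        else (acc.1, acc.2 ++ [arg])) ([], [])
    if st.2 ≠ [] then st.1 ++ [PySem.Str.join " " st.2] else st.1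

-- ===== PORT B =====
-- Source B's _PIECE regex is deterministic at each position, so each regex alternative is ported
-- as the case on the first character, consuming the maximal run the alternative matches:
-- (\s+) ↦ dropWhile bWS, '([^']*)' ↦ index? of the next quote + take/drop,
-- "((?:[^"\]|\\.)*)" ↦ bDqRaw (raw capture), \\(.) ↦ two chars, ([^\s'"\]+) ↦ takeWhile bPlain.
-- Exact on Dom (there \s matches exactly space/tab/LF/CR and . with DOTALL matches any char).
def bWS (c : Char) : Bool := c = ' ' || c = '\t' || c = '\n' || c = '\r'
def bPlain (c : Char) : Bool := !(bWS c) && !(c = '\'') && !(c = '"') && !(c = '\\')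

-- the raw text the dq group ((?:[^"\]|\\.)*) captures before the closing quote
def bDqRaw : List Char → Option (List Char × List Char)
  | [] => none
  | c :: rest =>
    if c = '"' then some ([], rest)
    else if c = '\\' then
      match rest with
      | [] => none
      | d :: rest' => (bDqRaw rest').map (fun p => (c :: d :: p.1, p.2))
    else (bDqRaw rest).map (fun p => (c :: p.1, p.2))

-- _DQ_ESCAPE.sub(r'\1', ·): drop a backslash before \ or ", left to right
def bDqUnescape : List Char → List Char
  | [] => []
  | '\\' :: c :: rest =>
    if c = '\\' ∨ c = '"' then c :: bDqUnescape rest else '\\' :: c :: bDqUnescape rest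
  | c :: rest => c :: bDqUnescape rest

-- the while loop of _tokens; fuel only makes it total (every piece consumes ≥ 1 char)
def bTok : Nat → List Char → List String → Option String → Option (List String)
  | 0, _, _, _ => none
  | _ + 1, [], toks, cur => some (match cur with | none => toks | some t => toks ++ [t])
  | fuel + 1, c :: rest, toks, cur =>
    if bWS c then
      match cur with
      | none => bTok fuel (rest.dropWhile bWS) toks none
      | some t => bTok fuel (rest.dropWhile bWS) (toks ++ [t]) none
    else if c = '\'' then
      match PySem.List.index? rest '\'' with
      | none => none
      | some j => bTok fuel (rest.drop (j + 1)) toks (some (cur.getD "" ++ String.ofList (rest.take j)))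
    else if c = '"' then
      match bDqRaw rest with
      | none => none
      | some p => bTok fuel p.2 toks (some (cur.getD "" ++ String.ofList (bDqUnescape p.1)))
    else if c = '\\' then
      match rest with
      | [] => none
      | d :: rest' => bTok fuel rest' toks (some (cur.getD "" ++ d.toString))
    else
      bTok fuel (rest.dropWhile bPlain) toks
        (some (cur.getD "" ++ String.ofList (c :: rest.takeWhile bPlain)))

def bSplit (cmd : String) : Option (List String) :=
  bTok (cmd.length + 1) cmd.toList [] none

-- Source B's pipe loop over a start offset: the offset maps to the suffix rem = args[start:];
-- args.index('|', start) ↦ index? rem (try/except ↦ match none/some),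
-- args[start:j] ↦ rem[:j-start], start = j+1 ↦ rem[j+1:].
def altGo (rem commands : List String) : List String :=
  match h : PySem.List.index? rem "|" with
  | none => if rem ≠ [] then commands ++ [PySem.Str.join " " rem] else commands
  | some j =>
    altGo (PySem.List.slice rem (some ((j : Int) + 1)) none)
          (commands ++ [PySem.Str.join " " (PySem.List.slice rem none (some (j : Int)))])
termination_by rem.length
decreasing_by
  rcases PySem.List.getElem_of_index?_eq_some h with ⟨hk, -, -⟩
  rw [show ((j : Int) + 1) = ((j + 1 : Nat) : Int) by push_cast; ring,
      PySem.List.slice_from_natCast]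
  simp only [List.length_drop]
  omega

def parse_multiple_commands_alt (cmd : String) : List String :=
  match bSplit cmd with
  | none => []   -- _tokens raised: excluded by Pre_
  | some args => altGo args []

-- ===== PRECONDITION & SPEC =====
-- Pre_ excludes exactly the inputs where shlex.split raises ValueError (an unclosed single or
-- double quote, or a backslash with nothing after it); A returns no value there.
-- Checked by a 5-state quote/escape automaton over the characters (0 normal, 1 escaped,
-- 2 in '...', 3 in "...", 4 escaped inside "..."): OK iff we end in state 0.
def shxState (st : Nat) (c : Char) : Nat :=
  if st = 0 then (if c = '\\' then 1 else if c = '\'' then 2 else if c = '"' then 3 else 0)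
  else if st = 1 then 0
  else if st = 2 then (if c = '\'' then 0 else 2)
  else if st = 3 then (if c = '"' then 0 else if c = '\\' then 4 else 3)
  else 3

def Pre_parse_multiple_commands (cmd : String) : Prop :=
  cmd.toList.foldl shxState 0 = 0
instance (cmd : String) : Decidable (Pre_parse_multiple_commands cmd) := by
  unfold Pre_parse_multiple_commands; infer_instance

def pvWitness_parse_multiple_commands : String := "echo 'a b' | grep a | wc -l"

def Spec_parse_multiple_commands (cmd : String) (out : List String) : Prop :=
  out = parse_multiple_commands_alt cmd
instance (cmd : String) (out : List String) : Decidable (Spec_parse_multiple_commands cmd out) := by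
  unfold Spec_parse_multiple_commands; infer_instance

-- ===== CLAIM (what is proved, stated in full; the proofs are below) =====
def Claim_equal_parse_multiple_commands : Prop :=
  ∀ (cmd : String), Dom_parse_multiple_commands cmd → Pre_parse_multiple_commands cmd →
    Spec_parse_multiple_commands cmd (parse_multiple_commands cmd)

-- ===== LEMMAS AND PROOFS =====

-- canonical meaning both splitting loops are reduced to
def canon : List String → List String → List String
  | cur, [] => if cur ≠ [] then [PySem.Str.join " " cur] else []
  | cur, a :: as =>
    if a = "|" then PySem.Str.join " " cur :: canon [] as else canon (cur ++ [a]) as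

theorem foldA_eq_canon (args cs cur) :
    (if (args.foldl
        (fun (acc : List String × List String) arg =>
          if arg = "|" then (acc.1 ++ [PySem.Str.join " " acc.2], [])
          else (acc.1, acc.2 ++ [arg])) (cs, cur)).2 ≠ []
     then (args.foldl
        (fun (acc : List String × List String) arg =>
          if arg = "|" then (acc.1 ++ [PySem.Str.join " " acc.2], [])
          else (acc.1, acc.2 ++ [arg])) (cs, cur)).1
          ++ [PySem.Str.join " " ((args.foldl
        (fun (acc : List String × List String) arg =>
          if arg = "|" then (acc.1 ++ [PySem.Str.join " " acc.2], [])
          else (acc.1, acc.2 ++ [arg])) (cs, cur)).2)]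
     else (args.foldl
        (fun (acc : List String × List String) arg =>
          if arg = "|" then (acc.1 ++ [PySem.Str.join " " acc.2], [])
          else (acc.1, acc.2 ++ [arg])) (cs, cur)).1)
    = cs ++ canon cur args := by
  induction args generalizing cs cur with
  | nil => simp only [List.foldl_nil, canon]; split_ifs <;> simp
  | cons a as ih =>
    simp only [List.foldl_cons, canon]
    by_cases ha : a = "|"
    · simp only [ha, ite_true]
      rw [show ((cs, cur).1 ++ [PySem.Str.join " " (cs, cur).2], ([] : List String))
            = (cs ++ [PySem.Str.join " " cur], []) from rfl]
      rw [ih]; simp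
    · simp only [if_neg ha]
      rw [show ((cs, cur).1, (cs, cur).2 ++ [a]) = (cs, cur ++ [a]) from rfl]
      exact ih cs (cur ++ [a])

theorem canon_no_pipe (args : List String) (hnp : "|" ∉ args) (cur : List String) :
    canon cur args = if cur ++ args ≠ [] then [PySem.Str.join " " (cur ++ args)] else [] := by
  induction args generalizing cur with
  | nil => simp [canon]
  | cons a as ih =>
    have ha : a ≠ "|" := fun h => hnp (h ▸ List.mem_cons_self ..)
    have has : "|" ∉ as := fun h => hnp (List.mem_cons_of_mem _ h)
    simp only [canon, if_neg ha, ih has]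
    simp

theorem canon_split (pre : List String) (hnp : "|" ∉ pre) (cur rest : List String) :
    canon cur (pre ++ "|" :: rest)
      = PySem.Str.join " " (cur ++ pre) :: canon [] rest := by
  induction pre generalizing cur with
  | nil => simp [canon]
  | cons a pre ih =>
    have ha : a ≠ "|" := fun h => hnp (h ▸ List.mem_cons_self ..)
    have hp : "|" ∉ pre := fun h => hnp (List.mem_cons_of_mem _ h)
    simp only [List.cons_append, canon, if_neg ha, ih hp]
    simp

theorem altGo_eq_canon (rem out : List String) :
    altGo rem out = out ++ canon [] rem := by
  induction hn : rem.length using Nat.strong_induction_on generalizing rem out with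
  | _ n ih =>
  subst hn
  rw [altGo.eq_def]
  split
  · rename_i h
    have hnp : "|" ∉ rem := (PySem.List.index?_eq_none_iff rem "|").1 h
    rw [canon_no_pipe rem hnp []]
    split_ifs <;> simp_all
  · rename_i j h
    rcases (PySem.List.index?_eq_some_iff rem "|" j).1 h with ⟨pre, suf, hsplit, hlen, hnp⟩
    have hto : PySem.List.slice rem none (some (j : Int)) = pre := by
      rw [PySem.List.slice_to_natCast, hsplit, ← hlen]
      simp
    have hfrom : PySem.List.slice rem (some ((j : Int) + 1)) none = suf := by
      rw [show ((j : Int) + 1) = ((j + 1 : Nat) : Int) by push_cast; ring,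
          PySem.List.slice_from_natCast, hsplit, ← hlen]
      simp [List.drop_append]
    have hlt : suf.length < rem.length := by
      rw [hsplit]; simp; omega
    rw [hto, hfrom, ih suf.length hlt suf _ rfl]
    rw [hsplit, canon_split pre hnp [] suf]
    simp

-- ===== tokenizer equivalence =====

theorem string_ofList_append (a b : List Char) :
    String.ofList a ++ String.ofList b = String.ofList (a ++ b) := by simp

theorem string_ofList_cons (c : Char) (l : List Char) :
    String.ofList (c :: l) = c.toString ++ String.ofList l := by
  rw [show c.toString = String.ofList [c] by simp [String.singleton_eq_ofList],
      string_ofList_append]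
  rfl
theorem string_append_ofList_nil (s : String) : s ++ String.ofList [] = s := by simp

theorem shxGo_cons (fuel : Nat) (c : Char) (rest : List Char) (cur : Option String) :
    shxGo (fuel+1) (c::rest) cur =
      (if shxWS c then
          match cur with
          | none => shxGo fuel rest none
          | some t => (shxGo fuel rest none).map (t :: ·)
        else if c = '\\' then
          match rest with
          | [] => none
          | d :: rest' => shxGo fuel rest' (some (cur.getD "" ++ d.toString))
        else if c = '\'' then
          (shxSingle rest).bind (fun p => shxGo fuel p.2 (some (cur.getD "" ++ p.1)))
        else if c = '"' then
          (shxDouble rest).bind (fun p => shxGo fuel p.2 (some (cur.getD "" ++ p.1)))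
        else shxGo fuel rest (some (cur.getD "" ++ c.toString))) := rfl

theorem bTok_cons (fuel : Nat) (c : Char) (rest : List Char) (toks : List String) (cur : Option String) :
    bTok (fuel+1) (c :: rest) toks cur =
      (if bWS c then
          match cur with
          | none => bTok fuel (rest.dropWhile bWS) toks none
          | some t => bTok fuel (rest.dropWhile bWS) (toks ++ [t]) none
        else if c = '\'' then
          match PySem.List.index? rest '\'' with
          | none => none
          | some j => bTok fuel (rest.drop (j + 1)) toks (some (cur.getD "" ++ String.ofList (rest.take j)))
        else if c = '"' then
          match bDqRaw rest with
          | none => none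
          | some p => bTok fuel p.2 toks (some (cur.getD "" ++ String.ofList (bDqUnescape p.1)))
        else if c = '\\' then
          match rest with
          | [] => none
          | d :: rest' => bTok fuel rest' toks (some (cur.getD "" ++ d.toString))
        else
          bTok fuel (rest.dropWhile bPlain) toks
            (some (cur.getD "" ++ String.ofList (c :: rest.takeWhile bPlain)))) := rfl

theorem bDqUnescape_esc (d : Char) (rest : List Char) :
    bDqUnescape ('\\' :: d :: rest)
      = if d = '\\' ∨ d = '"' then d :: bDqUnescape rest else '\\' :: d :: bDqUnescape rest := by
  rfl

theorem bDqUnescape_cons (c : Char) (rest : List Char) (h : ¬ c = '\\') :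
    bDqUnescape (c :: rest) = c :: bDqUnescape rest := by
  cases rest with
  | nil => rw [bDqUnescape.eq_def]; simp [h]
  | cons d r => rw [bDqUnescape.eq_def]; simp [h]

theorem shxSingle_len (cs : List Char) (p : String × List Char) (h : shxSingle cs = some p) :
    p.2.length < cs.length := by
  induction cs generalizing p with
  | nil => simp [shxSingle] at h
  | cons c rest ih =>
    rw [shxSingle] at h
    split_ifs at h with hc
    · cases h; simp
    · cases hr : shxSingle rest with
      | none => rw [hr] at h; simp at h
      | some q =>
        rw [hr] at h; cases h
        have := ih q hr
        simp at this ⊢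
        omega

theorem shxDouble_len (cs : List Char) : ∀ p, shxDouble cs = some p → p.2.length < cs.length := by
  fun_induction shxDouble cs with
  | case1 => intro p h; simp at h
  | case2 hc => intro p h; simp at h; cases h; simp
  | case3 => intro p h; simp at h
  | case4 hc hb d rest' ih =>
    intro p h
    simp only [Option.map_eq_some_iff] at h
    obtain ⟨q, hq, hp⟩ := h
    have := ih q hq
    subst hp; simp at this ⊢; omega
  | case5 =>
    rename_i ih
    intro p h
    simp only [Option.map_eq_some_iff] at h
    obtain ⟨q, hq, hp⟩ := h
    have := ih q hq
    subst hp; simp at this ⊢; omega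

theorem shxSingle_eq_index? (cs : List Char) :
    shxSingle cs = (PySem.List.index? cs '\'').map
      (fun j => (String.ofList (cs.take j), cs.drop (j + 1))) := by
  induction cs with
  | nil => rfl
  | cons c rest ih =>
    by_cases h : c = '\''
    · subst h
      rw [PySem.List.index?_cons_self]
      simp [shxSingle]
    · rw [shxSingle, if_neg h, PySem.List.index?_cons_of_ne _ h, ih, Option.map_map]
      cases PySem.List.index? rest '\'' <;>
        simp [String.singleton_eq_ofList, string_ofList_append]

-- shxDouble is bDqRaw's raw capture followed by the unescape pass
theorem shxDouble_eq_bDqRaw (cs : List Char) :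
    shxDouble cs = (bDqRaw cs).map (fun p => (String.ofList (bDqUnescape p.1), p.2)) := by
  fun_induction bDqRaw cs with
  | case1 => rfl
  | case2 =>
    rw [shxDouble.eq_def]
    simp only [reduceIte]
    rfl
  | case3 => decide
  | case4 =>
    rename_i d rest' hcond ih
    rw [shxDouble.eq_def]
    simp only [ih, Option.map_map, if_neg hcond]
    cases bDqRaw rest' with
    | none => rfl
    | some q =>
      simp only [Option.map_some, Function.comp_def]
      rw [bDqUnescape_esc]
      refine congrArg some (congrArg (fun s => (s, q.2)) ?_)
      split_ifs with h1 h2 h2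
      · rw [string_ofList_cons]
      · tauto
      · tauto
      · rw [string_ofList_cons, string_ofList_cons, ← String.append_assoc]
        congr 2
  | case5 =>
    rename_i c rest hc hb ih
    rw [shxDouble.eq_def]
    simp only [if_neg hc, if_neg hb, ih, Option.map_map]
    cases bDqRaw rest with
    | none => rfl
    | some q =>
      simp only [Option.map_some, Function.comp_def]
      rw [bDqUnescape_cons c q.1 hb]
      simp only [Option.some.injEq, Prod.mk.injEq, string_ofList_cons, and_true]
theorem bDqRaw_len (cs : List Char) (p) (h : bDqRaw cs = some p) :
    p.2.length < cs.length := by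
  have := shxDouble_len cs (String.ofList (bDqUnescape p.1), p.2)
  rw [shxDouble_eq_bDqRaw, h] at this
  exact this rfl

-- shxGo's result does not depend on the fuel, as long as fuel > length
theorem shxGo_fuel (n : Nat) : ∀ (cs : List Char), cs.length ≤ n →
    ∀ cur f1 f2, cs.length < f1 → cs.length < f2 → shxGo f1 cs cur = shxGo f2 cs cur := by
  induction n with
  | zero =>
    intro cs hcs cur f1 f2 h1 h2
    interval_cases hlen : cs.length
    · cases cs with
      | nil =>
        cases f1 with
        | zero => omega
        | succ g1 => cases f2 with
          | zero => omega
          | succ g2 => rfl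
      | cons c rest => simp at hlen
  | succ n ih =>
    intro cs hcs cur f1 f2 h1 h2
    cases f1 with
    | zero => omega
    | succ g1 =>
    cases f2 with
    | zero => omega
    | succ g2 =>
    cases cs with
    | nil => rfl
    | cons c rest =>
      have hr : rest.length ≤ n := by simp at hcs; omega
      have hg1 : rest.length < g1 := by simp at h1; omega
      have hg2 : rest.length < g2 := by simp at h2; omega
      rw [shxGo_cons, shxGo_cons]
      split_ifs with hws hbs hsq hdq
      · cases cur with
        | none => exact ih rest hr none g1 g2 hg1 hg2
        | some t => rw [ih rest hr none g1 g2 hg1 hg2]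
      · cases rest with
        | nil => rfl
        | cons d rest' =>
          exact ih rest' (by simp at hcs; omega) _ g1 g2 (by simp at h1; omega) (by simp at h2; omega)
      · cases hs : shxSingle rest with
        | none => rfl
        | some p =>
          have hlt := shxSingle_len rest p hs
          exact ih p.2 (by omega) _ g1 g2 (by omega) (by omega)
      · cases hd : shxDouble rest with
        | none => rfl
        | some p =>
          have hlt := shxDouble_len rest p hd
          exact ih p.2 (by omega) _ g1 g2 (by omega) (by omega)
      · exact ih rest hr _ g1 g2 hg1 hg2

-- with no token in progress, leading whitespace is skipped
theorem shxGo_dropWhile_ws (cs : List Char) : ∀ fuel, cs.length < fuel →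
    shxGo fuel cs none = shxGo fuel (cs.dropWhile shxWS) none := by
  induction cs with
  | nil => intro fuel h; rfl
  | cons c rest ih =>
    intro fuel h
    cases fuel with
    | zero => omega
    | succ g =>
      by_cases hws : shxWS c
      · rw [List.dropWhile_cons_of_pos hws]
        have hlen : rest.length < g := by simp only [List.length_cons] at h; omega
        rw [show shxGo (g+1) (c::rest) none = shxGo g rest none by
          rw [shxGo_cons]; simp [hws]]
        rw [shxGo_fuel rest.length rest le_rfl none g (g+1) hlen (by omega)]
        exact ih (g+1) (by omega)
      · rw [List.dropWhile_cons_of_neg hws]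

-- a run of plain characters is appended to the current token in one go
theorem shxGo_plain_run (run : List Char) : ∀ (hp : ∀ c ∈ run, bPlain c = true)
    (rest : List Char) (s : String) (fuel : Nat), run.length + rest.length < fuel →
    shxGo fuel (run ++ rest) (some s) = shxGo fuel rest (some (s ++ String.ofList run)) := by
  induction run with
  | nil =>
    intro _ rest s fuel _
    rw [string_append_ofList_nil, List.nil_append]
  | cons c run' ih =>
    intro hp rest s fuel hf
    have hc : bPlain c = true := hp c (by simp)
    have hws : ¬ shxWS c := by simp [bPlain, bWS] at hc; simp [shxWS]; tauto
    have hbs : ¬ (c = '\\') := by simp [bPlain] at hc; tauto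
    have hsq : ¬ (c = '\'') := by simp [bPlain] at hc; tauto
    have hdq : ¬ (c = '"') := by simp [bPlain] at hc; tauto
    have hg : run'.length + rest.length < fuel - 1 ∧ 0 < fuel := by
      simp only [List.length_cons] at hf; omega
    cases fuel with
    | zero => omega
    | succ g =>
      have hlen : (run' ++ rest).length < g := by
        simp only [List.length_append]; omega
      rw [show shxGo (g+1) ((c::run') ++ rest) (some s)
            = shxGo g (run' ++ rest) (some (s ++ c.toString)) by
        rw [List.cons_append, shxGo_cons]; simp [hws, hbs, hsq, hdq]]
      rw [shxGo_fuel (run' ++ rest).length _ le_rfl _ g (g+1) hlen (by omega)]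
      rw [ih (fun d hd => hp d (by simp [hd])) rest _ (g+1) (by omega)]
      congr 1
      rw [string_ofList_cons, ← String.append_assoc]

-- the piece-based loop computes exactly what shlex's char loop computes
theorem bTok_eq_shxGo (n : Nat) : ∀ (cs : List Char), cs.length ≤ n →
    ∀ (toks : List String) (cur : Option String) (fB fA : Nat),
      cs.length < fB → cs.length < fA →
      bTok fB cs toks cur = (shxGo fA cs cur).map (toks ++ ·) := by
  induction n with
  | zero =>
    intro cs hcs toks cur fB fA hB hA
    have : cs = [] := List.length_eq_zero_iff.mp (by omega)
    subst this
    cases fB with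
    | zero => omega
    | succ gB => cases fA with
      | zero => omega
      | succ gA => cases cur <;> simp [bTok, shxGo]
  | succ n ih =>
    intro cs hcs toks cur fB fA hB hA
    cases fB with
    | zero => omega
    | succ gB =>
    cases fA with
    | zero => omega
    | succ gA =>
    cases cs with
    | nil => cases cur <;> simp [bTok, shxGo]
    | cons c rest =>
      have hrn : rest.length ≤ n := by simp at hcs; omega
      have hgB : rest.length < gB := by simp at hB; omega
      have hgA : rest.length < gA := by simp at hA; omega
      have hws_eq : bWS c = shxWS c := by simp [bWS, shxWS]
      rw [bTok_cons, shxGo_cons, ← hws_eq]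
      by_cases hws : bWS c
      · -- whitespace: B drops the whole run, A drops one char at a time
        have hd : (rest.dropWhile bWS).length ≤ rest.length := List.length_dropWhile_le ..
        have hAeq : shxGo gA rest none = shxGo gA (rest.dropWhile bWS) none := by
          rw [show bWS = shxWS from funext fun c => by simp [bWS, shxWS]]
          exact shxGo_dropWhile_ws rest gA hgA
        simp only [if_pos hws]
        cases cur with
        | none =>
          dsimp only
          rw [ih (rest.dropWhile bWS) (by omega) toks none gB gA (by omega) (by omega), hAeq]
        | some t =>
          dsimp only
          rw [ih (rest.dropWhile bWS) (by omega) (toks ++ [t]) none gB gA (by omega) (by omega), hAeq]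
          cases shxGo gA (rest.dropWhile bWS) none <;> simp
      · by_cases hbs : c = '\\'
        · -- backslash escape
          have hsq : ¬ c = '\'' := by subst hbs; decide
          have hdq : ¬ c = '"' := by subst hbs; decide
          simp only [if_neg hws, if_pos hbs, if_neg hsq, if_neg hdq]
          cases rest with
          | nil => rfl
          | cons d rest' =>
            dsimp only
            exact ih rest' (by simp at hcs; omega) toks
              (some (cur.getD "" ++ d.toString)) gB gA (by simp at hB; omega) (by simp at hA; omega)
        · by_cases hsq : c = '\''
          · -- single quote
            have hdq : ¬ c = '"' := by subst hsq; decide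
            simp only [if_neg hws, if_neg hbs, if_pos hsq, if_neg hdq]
            rw [shxSingle_eq_index?]
            cases hj : PySem.List.index? rest '\'' with
            | none => rfl
            | some j =>
              rcases PySem.List.getElem_of_index?_eq_some hj with ⟨hjlt, -, -⟩
              simp only [Option.map_some, Option.bind_some]
              have hlen : (rest.drop (j+1)).length ≤ rest.length - 1 := by simp; omega
              exact ih (rest.drop (j+1)) (by omega) toks
                (some (cur.getD "" ++ String.ofList (rest.take j))) gB gA (by omega) (by omega)
          · by_cases hdq : c = '"'
            · -- double quote
              simp only [if_neg hws, if_neg hbs, if_neg hsq, if_pos hdq]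
              rw [shxDouble_eq_bDqRaw]
              cases hq : bDqRaw rest with
              | none => rfl
              | some p =>
                have hlt := bDqRaw_len rest p hq
                simp only [Option.map_some, Option.bind_some]
                exact ih p.2 (by omega) toks
                  (some (cur.getD "" ++ String.ofList (bDqUnescape p.1))) gB gA (by omega) (by omega)
            · -- plain word: B takes the maximal run, A appends one char at a time
              simp only [if_neg hws, if_neg hbs, if_neg hsq, if_neg hdq]
              have hrun : ∀ d ∈ rest.takeWhile bPlain, bPlain d = true :=
                fun d hd => List.mem_takeWhile_imp hd
              have hsplit : rest = rest.takeWhile bPlain ++ rest.dropWhile bPlain :=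
                (List.takeWhile_append_dropWhile).symm
              have hlen : (rest.dropWhile bPlain).length ≤ rest.length := List.length_dropWhile_le ..
              have htk : (rest.takeWhile bPlain).length + (rest.dropWhile bPlain).length = rest.length := by
                rw [← List.length_append, ← hsplit]
              rw [show shxGo gA rest (some (cur.getD "" ++ c.toString))
                    = shxGo gA (rest.dropWhile bPlain)
                        (some (cur.getD "" ++ c.toString ++ String.ofList (rest.takeWhile bPlain))) by
                conv_lhs => rw [hsplit]
                exact shxGo_plain_run (rest.takeWhile bPlain) hrun (rest.dropWhile bPlain) _ gA (by omega)]
              rw [ih (rest.dropWhile bPlain) (by omega) toks _ gB gA (by omega) (by omega)]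
              congr 3
              rw [string_ofList_cons, ← String.append_assoc]

theorem bSplit_eq_shlexSplit (cmd : String) : bSplit cmd = shlexSplit cmd := by
  rw [bSplit, shlexSplit,
    bTok_eq_shxGo cmd.toList.length cmd.toList le_rfl [] none (cmd.length + 1) (cmd.length + 1)
      (by simp) (by simp)]
  cases shxGo (cmd.length + 1) cmd.toList none <;> simp

-- ===== VERDICT (by name: the statement is the Claim_ definition above) =====
theorem parse_multiple_commands_spec : Claim_equal_parse_multiple_commands := by
  intro cmd _ _
  unfold Spec_parse_multiple_commands parse_multiple_commands parse_multiple_commands_alt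
  rw [bSplit_eq_shlexSplit]
  cases h : shlexSplit cmd with
  | none => rfl
  | some args =>
    dsimp only
    rw [foldA_eq_canon args [] [], altGo_eq_canon args []]
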